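-- pv_equiv track=rewrite | github.com/zhenfelix/OnlineJudgeCodings | LeetCode/3768. Minimum Inversion Count in Subarrays of Fixed Length/solution.py | minInversionCount
-- ===== SOURCE A (Python) =====
-- from typing import List
--
-- def minInversionCount(nums: List[int], k: int) -> int:
--     d = {v: i + 1 for i, v in enumerate(sorted(set(nums)))}
--     m, tr = len(d), [0] * (len(d) + 1)
--
--     def u(i, v):
--         while i <= m: tr[i] += v; i += i & -i
--
--     def q(i):
--         s = 0
--         while i: s += tr[i]; i -= i & -i
--         return s
--
--     cur = 0
--     for i, x in enumerate(nums[:k]):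
--         r = d[x]
--         cur += i - q(r)
--         u(r, 1)
--
--     ans = cur
--     for i in range(k, len(nums)):
--         r_out = d[nums[i-k]]
--         u(r_out, -1)
--         cur -= q(r_out - 1)
--
--         r_in = d[nums[i]]
--         cur += k - 1 - q(r_in)
--         u(r_in, 1)
--
--         if cur < ans: ans = cur
--
--     return ans
-- ===== SOURCE B (Python) =====
-- from typing import List
--
-- def minInversionCount(nums: List[int], k: int) -> int:
--     def inv(w):
--         c = 0
--         for j in range(len(w)):
--             for i in range(j):
--                 if w[i] > w[j]:
--                     c += 1
--         return c
--
--     best = inv(nums[:k])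
--     for s in range(1, len(nums) - k + 1):
--         best = min(best, inv(nums[s:s + k]))
--     return best
-- ===== Notes on version B (the rewrite author's own statement) =====
-- stated objective: simpler
-- what changed: Replaced the ordinal-compression + Fenwick-tree sliding window with a direct brute force: count inversions of each window by a nested pair loop and take the running minimum.
import Mathlib
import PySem

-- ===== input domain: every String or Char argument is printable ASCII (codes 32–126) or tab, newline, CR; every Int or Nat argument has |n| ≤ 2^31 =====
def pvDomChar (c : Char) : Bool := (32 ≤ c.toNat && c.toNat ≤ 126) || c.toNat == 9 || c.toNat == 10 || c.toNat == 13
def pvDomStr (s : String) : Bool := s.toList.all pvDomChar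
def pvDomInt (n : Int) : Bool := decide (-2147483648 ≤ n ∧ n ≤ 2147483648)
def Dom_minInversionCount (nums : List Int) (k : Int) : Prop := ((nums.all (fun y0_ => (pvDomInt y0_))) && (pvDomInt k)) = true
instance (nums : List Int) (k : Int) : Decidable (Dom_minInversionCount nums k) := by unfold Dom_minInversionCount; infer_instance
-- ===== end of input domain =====

-- B replaces A's ordinal-compression + Fenwick-tree sliding window by a direct brute force
-- (nested pair loop per window, running minimum): simpler, same results on every k ≥ 0.


-- lowbit positivity: needed by the termination proofs of the Fenwick helpers below
theorem pv_land_lt (m : Nat) (h : 0 < m) : m &&& (m - 1) < m := by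
  have := @Nat.and_le_right m (m - 1)
  omega

theorem pv_band_pos (i : Int) (h : 0 < i) : 0 < PySem.Int.band i (-i) := by
  have h1 : ¬ (0 ≤ -i) := by omega
  have h2 : (0:Int) ≤ i := by omega
  simp only [PySem.Int.band, if_pos h2, if_neg h1]
  have h3 : (-(-i) - 1).toNat = i.toNat - 1 := by omega
  rw [h3]
  have := pv_land_lt i.toNat (by omega)
  omega

-- ===== PORT A =====
-- `def u(i, v): while i <= m: tr[i] += v; i += i & -i` — the extra `0 < i` in the guard only
-- makes the recursion total (Python loops forever for i ≤ 0; u is only ever called with i ≥ 1).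
def fenU (m : Int) (tr : List Int) (i v : Int) : List Int :=
  if h : 0 < i ∧ i ≤ m then
    fenU m (PySem.List.pySetD tr i (PySem.List.pyGetD tr i 0 + v)) (i + PySem.Int.band i (-i)) v
  else tr
termination_by (m + 1 - i).toNat
decreasing_by
  have := pv_band_pos i h.1
  omega

-- `def q(i): s = 0; while i: s += tr[i]; i -= i & -i; return s`
-- (`while i` with i < 0 loops forever in Python; q is only ever called with i ≥ 0)
def fenQ (tr : List Int) (i : Int) : Int :=
  if h : 0 < i then fenQ tr (i - PySem.Int.band i (-i)) + PySem.List.pyGetD tr i 0 else 0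
termination_by i.toNat
decreasing_by
  have := pv_band_pos i h
  omega

-- tr[i] / nums[j] are ported with the total pyGetD/pySetD and d[x] with Dict.getD: under
-- Pre_ (0 ≤ k) every index A actually uses is in range and every key is present, so these
-- agree with Python's tr[i] / nums[j] / d[x] everywhere the claim speaks.
def minInversionCount (nums : List Int) (k : Int) : Int :=
  let s := PySem.List.sorted (PySem.Set.ofList nums) (fun x => x) false
  let d : PySem.Dict Int Int :=
    (PySem.List.enumerate s 0).foldl (fun dd p => dd.insert p.2 (p.1 + 1)) PySem.Dict.empty
  let m : Int := PySem.Dict.size d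
  let tr : List Int := List.replicate (m.toNat + 1) 0
  let st1 :=
    (PySem.List.enumerate (PySem.List.slice nums none (some k)) 0).foldl
      (fun st p =>
        let r := PySem.Dict.getD d p.2 0
        (st.1 + p.1 - fenQ st.2 r, fenU m st.2 r 1))
      ((0 : Int), tr)
  let fin :=
    (PySem.List.pyRange k (nums.length : Int) 1).foldl
      (fun st i =>
        let rOut := PySem.Dict.getD d (PySem.List.pyGetD nums (i - k) 0) 0
        let tr1 := fenU m st.2.2 rOut (-1)
        let cur1 := st.1 - fenQ tr1 (rOut - 1)
        let rIn := PySem.Dict.getD d (PySem.List.pyGetD nums i 0) 0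
        let cur2 := cur1 + k - 1 - fenQ tr1 rIn
        let tr2 := fenU m tr1 rIn 1
        (cur2, (if cur2 < st.2.1 then cur2 else st.2.1), tr2))
      (st1.1, st1.1, st1.2)
  fin.2.1

-- ===== PORT B =====
def invB (w : List Int) : Int :=
  (PySem.List.pyRange 0 (w.length : Int) 1).foldl
    (fun c j =>
      (PySem.List.pyRange 0 j 1).foldl
        (fun c i => if PySem.List.pyGetD w i 0 > PySem.List.pyGetD w j 0 then c + 1 else c) c)
    0

def minInversionCount_alt (nums : List Int) (k : Int) : Int :=
  (PySem.List.pyRange 1 ((nums.length : Int) - k + 1) 1).foldl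
    (fun best s => min best (invB (PySem.List.slice nums (some s) (some (s + k)))))
    (invB (PySem.List.slice nums none (some k)))

-- ===== PRECONDITION & SPEC =====
-- For k < 0 A raises IndexError (nums[i-k] runs past the end of the list); those inputs are
-- excluded. A returns on every nums and every k ≥ 0, and all of those are admitted.
def Pre_minInversionCount (nums : List Int) (k : Int) : Prop := 0 ≤ k
instance (nums : List Int) (k : Int) : Decidable (Pre_minInversionCount nums k) := by unfold Pre_minInversionCount; infer_instance
def pvWitness_minInversionCount : List Int × Int := ([3, 1, 2, 4], 2)

def Spec_minInversionCount (nums : List Int) (k : Int) (out : Int) : Prop := out = minInversionCount_alt nums k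
instance (nums : List Int) (k : Int) (out : Int) : Decidable (Spec_minInversionCount nums k out) := by unfold Spec_minInversionCount; infer_instance

-- ===== CLAIM (what is proved, stated in full; the proofs are below) =====
def Claim_equal_minInversionCount : Prop := ∀ (nums : List Int) (k : Int), Dom_minInversionCount nums k → Pre_minInversionCount nums k → Spec_minInversionCount nums k (minInversionCount nums k)

-- ===== LEMMAS AND PROOFS =====

theorem landA' (a b : Nat) : (2 * a + 1) &&& (2 * b) = 2 * (a &&& b) := by
  apply Nat.eq_of_testBit_eq
  intro i
  cases i with
  | zero => simp [Nat.testBit_zero]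
  | succ n =>
    simp only [Nat.testBit_add_one, Nat.and_div_two]
    have h1 : (2 * a + 1) / 2 = a := by omega
    have h2 : (2 * b) / 2 = b := by omega
    have h3 : (2 * (a &&& b)) / 2 = a &&& b := by omega
    rw [h1, h2, h3]
theorem landB' (a b : Nat) : (2 * a) &&& (2 * b + 1) = 2 * (a &&& b) := by
  apply Nat.eq_of_testBit_eq
  intro i
  cases i with
  | zero => simp [Nat.testBit_zero]
  | succ n =>
    simp only [Nat.testBit_add_one, Nat.and_div_two]
    have h1 : (2 * a) / 2 = a := by omega
    have h2 : (2 * b + 1) / 2 = b := by omega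
    have h3 : (2 * (a &&& b)) / 2 = a &&& b := by omega
    rw [h1, h2, h3]
def lbN (m : Nat) : Nat := m - (m &&& (m - 1))
theorem lbN_odd (m : Nat) (h : m % 2 = 1) : lbN m = 1 := by
  obtain ⟨s, rfl⟩ : ∃ s, m = 2 * s + 1 := ⟨m / 2, by omega⟩
  unfold lbN
  have h1 : 2 * s + 1 - 1 = 2 * s := by omega
  rw [h1, landA', Nat.and_self]
  omega
theorem lbN_even (m : Nat) (h : m % 2 = 0) (h0 : 0 < m) : lbN m = 2 * lbN (m / 2) := by
  obtain ⟨s, rfl⟩ : ∃ s, m = 2 * s := ⟨m / 2, by omega⟩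
  unfold lbN
  have hs : 0 < s := by omega
  have h1 : 2 * s - 1 = 2 * (s - 1) + 1 := by omega
  rw [h1, landB']
  have h2 : 2 * s / 2 = s := by omega
  rw [h2]
  have := @Nat.and_le_right s (s - 1)
  omega
theorem lbN_spec (m : Nat) (h : 0 < m) : ∃ e, lbN m = 2 ^ e ∧ 2 ^ e ∣ m ∧ ¬ 2 ^ (e + 1) ∣ m := by
  induction m using Nat.strong_induction_on with
  | _ m ih =>
    rcases Nat.even_or_odd m with he | ho
    · have hm2 : m % 2 = 0 := by
        rcases he with ⟨t, ht⟩; omega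
      have hs : 0 < m / 2 := by omega
      obtain ⟨e, h1, h2, h3⟩ := ih (m / 2) (by omega) hs
      refine ⟨e + 1, ?_, ?_, ?_⟩
      · rw [lbN_even m hm2 h, h1]; ring
      · obtain ⟨c, hc⟩ := h2
        refine ⟨c, ?_⟩
        have hm : m = 2 * (m / 2) := by omega
        rw [hm, hc]; ring
      · rintro ⟨c, hc⟩
        apply h3
        refine ⟨c, ?_⟩
        have : m = 2 * (2 ^ (e + 1) * c) := by rw [hc]; ring
        omega
    · have hm2 : m % 2 = 1 := by
        rcases ho with ⟨t, ht⟩; omega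
      refine ⟨0, by rw [lbN_odd m hm2]; norm_num, one_dvd m, ?_⟩
      rintro ⟨c, hc⟩
      simp [pow_one] at hc
      omega
theorem lbN_pos (m : Nat) (h : 0 < m) : 0 < lbN m := by
  obtain ⟨e, h1, _, _⟩ := lbN_spec m h
  rw [h1]; positivity
theorem lbN_le (m : Nat) (h : 0 < m) : lbN m ≤ m := by
  obtain ⟨e, h1, h2, _⟩ := lbN_spec m h
  rw [h1]; exact Nat.le_of_dvd h h2
theorem lbN_nest (m : Nat) (h : 0 < m) : 2 * lbN m ≤ lbN (m + lbN m) := by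
  obtain ⟨e, h1, h2, h3⟩ := lbN_spec m h
  obtain ⟨c, hc⟩ := h2
  have hodd : c % 2 = 1 := by
    rcases Nat.even_or_odd c with ⟨t, ht⟩ | ⟨t, ht⟩
    · exfalso; apply h3; exact ⟨t, by rw [hc, ht, pow_succ]; ring⟩
    · omega
  have hdvd : 2 ^ (e + 1) ∣ m + lbN m := by
    refine ⟨(c + 1) / 2, ?_⟩
    have : m + lbN m = 2 ^ e * (c + 1) := by rw [h1, hc]; ring
    rw [this, pow_succ]
    have h4 : c + 1 = 2 * ((c + 1) / 2) := by omega
    calc 2 ^ e * (c + 1) = 2 ^ e * (2 * ((c + 1) / 2)) := by rw [← h4]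
    _ = 2 ^ e * 2 * ((c + 1) / 2) := by ring
  obtain ⟨f, g1, g2, g3⟩ := lbN_spec (m + lbN m) (by omega)
  have hef : e + 1 ≤ f := by
    by_contra hlt
    exact g3 (dvd_trans (pow_dvd_pow 2 (by omega)) hdvd)
  rw [g1, h1, ← pow_succ']
  exact Nat.pow_le_pow_right (by omega) hef
theorem lbN_L2 (r j : Nat) (hr : 0 < r) (hlow : j - lbN j < r) (hrj : r < j) : r + lbN r ≤ j := by
  have hj : 0 < j := by omega
  obtain ⟨a, ja1, ja2, ja3⟩ := lbN_spec j hj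
  obtain ⟨w, hw⟩ := ja2
  have hwodd : w % 2 = 1 := by
    rcases Nat.even_or_odd w with ⟨t, ht⟩ | ⟨t, ht⟩
    · exfalso; exact ja3 ⟨t, by rw [hw, ht, pow_succ]; ring⟩
    · omega
  -- j = 2^a * w, w odd; write q := w / 2 so j = q*2^(a+1) + 2^a
  set q := w / 2 with hq
  have hjq : j = q * 2 ^ (a + 1) + 2 ^ a := by
    rw [hw, pow_succ]
    have : w = 2 * q + 1 := by omega
    rw [this]; ring
  have hlbj : lbN j = 2 ^ a := ja1
  -- r = q*2^(a+1) + t with 0 < t < 2^a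
  have hpos2a : 0 < 2 ^ a := by positivity
  set t := r - q * 2 ^ (a + 1) with ht
  have htb : 0 < t ∧ t < 2 ^ a ∧ r = q * 2 ^ (a + 1) + t := by
    rw [hlbj] at hlow
    constructor
    · omega
    constructor
    · omega
    · omega
  obtain ⟨ht0, ht1, htr⟩ := htb
  obtain ⟨b, rb1, rb2, rb3⟩ := lbN_spec r hr
  -- b ≤ a-1 i.e. b < a
  have hba : b < a := by
    by_contra hge
    -- then 2^a ∣ r, so 2^a ∣ t, contradiction with 0 < t < 2^a
    have h2a : (2 : Nat) ^ a ∣ r := dvd_trans (pow_dvd_pow 2 (by omega)) rb2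
    have h2t : (2 : Nat) ^ a ∣ t := by
      have hqd : (2:Nat) ^ a ∣ q * 2 ^ (a + 1) := ⟨q * 2, by rw [pow_succ]; ring⟩
      exact Nat.dvd_sub h2a hqd
    exact absurd (Nat.le_of_dvd ht0 h2t) (by omega)
  -- 2^b ∣ t and ¬ 2^(b+1) ∣ t
  have hq2 : (2:Nat) ^ (b + 1) ∣ q * 2 ^ (a + 1) := by
    refine dvd_mul_of_dvd_right (pow_dvd_pow 2 (by omega)) q
  have hbt : (2:Nat) ^ b ∣ t := by
    have h1 : (2:Nat) ^ b ∣ q * 2 ^ (a + 1) := dvd_trans (pow_dvd_pow 2 (by omega)) hq2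
    exact Nat.dvd_sub rb2 h1
  have hbt1 : ¬ (2:Nat) ^ (b + 1) ∣ t := by
    intro hdvd
    exact rb3 (by rw [htr]; exact Nat.dvd_add hq2 hdvd)
  obtain ⟨u, hu⟩ := hbt
  have huodd : u % 2 = 1 := by
    rcases Nat.even_or_odd u with ⟨s, hs⟩ | ⟨s, hs⟩
    · exact absurd (⟨s, by rw [hu, hs, pow_succ]; ring⟩ : (2:Nat)^(b+1) ∣ t) hbt1
    · omega
  -- u < 2^(a-b), u odd → u + 1 ≤ 2^(a-b), so t + 2^b ≤ 2^a
  have hub : u < 2 ^ (a - b) := by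
    by_contra hge
    have : 2 ^ a ≤ t := by
      have hcu : 2 ^ (a - b) ≤ u := by omega
      calc 2 ^ a = 2 ^ b * 2 ^ (a - b) := by rw [← pow_add, Nat.add_sub_cancel' (le_of_lt hba)]
      _ ≤ 2 ^ b * u := Nat.mul_le_mul (Nat.le_refl _) hcu
      _ = t := by rw [hu]
    omega
  have hfin : t + 2 ^ b ≤ 2 ^ a := by
    calc t + 2 ^ b = 2 ^ b * (u + 1) := by rw [hu]; ring
    _ ≤ 2 ^ b * 2 ^ (a - b) := Nat.mul_le_mul (Nat.le_refl _) (by omega)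
    _ = 2 ^ a := by rw [← pow_add, Nat.add_sub_cancel' (le_of_lt hba)]
  rw [rb1, htr, hjq]
  omega

theorem sum_Ioc_consec (f : Int → Int) (a b c : Int) (h1 : a ≤ b) (h2 : b ≤ c) :
    ∑ i ∈ Finset.Ioc a b, f i + ∑ i ∈ Finset.Ioc b c, f i = ∑ i ∈ Finset.Ioc a c, f i := by
  rw [← Finset.sum_union ?d]
  · rw [Finset.Ioc_union_Ioc_eq_Ioc h1 h2]
  case d =>
    rw [Finset.disjoint_left]
    intro x hx1 hx2
    simp only [Finset.mem_Ioc] at hx1 hx2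
    omega

theorem band_eq_lbN (i : Int) (h : 0 < i) : PySem.Int.band i (-i) = (lbN i.toNat : Int) := by
  have h1 : ¬ (0 ≤ -i) := by omega
  have h2 : (0:Int) ≤ i := by omega
  simp only [PySem.Int.band, if_pos h2, if_neg h1]
  have h3 : (-(-i) - 1).toNat = i.toNat - 1 := by omega
  rw [h3]; rfl


theorem band_nest (i : Int) (h : 0 < i) :
    (i + PySem.Int.band i (-i)) - PySem.Int.band (i + PySem.Int.band i (-i)) (-(i + PySem.Int.band i (-i)))
      ≤ i - PySem.Int.band i (-i) := by
  rw [band_eq_lbN i h]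
  have hp := lbN_pos i.toNat (by omega)
  have hg : (0:Int) < i + (lbN i.toNat : Int) := by omega
  rw [band_eq_lbN _ hg]
  have ht : (i + (lbN i.toNat : Int)).toNat = i.toNat + lbN i.toNat := by omega
  rw [ht]
  have h1 := lbN_nest i.toNat (by omega)
  have h2 := lbN_le (i.toNat + lbN i.toNat) (by omega)
  omega

theorem band_L2 (r j : Int) (hr : 0 < r) (hlow : j - PySem.Int.band j (-j) < r) (hrj : r < j) :
    r + PySem.Int.band r (-r) ≤ j := by
  have hj : (0:Int) < j := by omega
  rw [band_eq_lbN r hr]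
  rw [band_eq_lbN j hj] at hlow
  have hlb := lbN_le j.toNat (by omega)
  have h2 := lbN_L2 r.toNat j.toNat (by omega) (by omega) (by omega)
  omega

def FInv (a : Int → Int) (m : Int) (tr : List Int) : Prop :=
  0 ≤ m ∧ tr.length = m.toNat + 1 ∧
  ∀ j : Int, 0 < j → j ≤ m →
    PySem.List.pyGetD tr j 0 = ∑ r ∈ Finset.Ioc (j - PySem.Int.band j (-j)) j, a r

theorem FInv_congr {a b : Int → Int} {m : Int} {tr : List Int} (h : ∀ x, a x = b x)
    (hI : FInv a m tr) : FInv b m tr := by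
  refine ⟨hI.1, hI.2.1, fun j h1 h2 => ?_⟩
  rw [hI.2.2 j h1 h2]
  exact Finset.sum_congr rfl (fun x _ => h x)

theorem FInv_init (m : Int) (hm : 0 ≤ m) : FInv (fun _ => 0) m (List.replicate (m.toNat + 1) 0) := by
  refine ⟨hm, by simp, fun j h1 h2 => ?_⟩
  rw [PySem.List.pyGetD_of_nonneg _ _ (by omega : (0:Int) ≤ j),
      List.getD_replicate _ (by omega)]
  simp

theorem length_fenU (m : Int) (tr : List Int) (i v : Int) : (fenU m tr i v).length = tr.length := by
  induction tr, i using fenU.induct m v with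
  | case1 tr i h ih =>
    rw [fenU, dif_pos h, ih, PySem.List.length_pySetD]
  | case2 tr i h => rw [fenU, dif_neg h]

theorem fenQ_correct_aux {a : Int → Int} {m : Int} {tr : List Int} (hInv : FInv a m tr) :
    ∀ (n : Nat) (i : Int), i.toNat ≤ n → 0 ≤ i → i ≤ m → fenQ tr i = ∑ r ∈ Finset.Ioc 0 i, a r := by
  intro n
  induction n with
  | zero =>
    intro i hn h0 hm
    have : i = 0 := by omega
    subst this
    rw [fenQ, dif_neg (by omega)]
    simp
  | succ n ih =>
    intro i hn h0 hm
    by_cases hi : 0 < i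
    · rw [fenQ, dif_pos hi]
      have hb := band_eq_lbN i hi
      have hbp := lbN_pos i.toNat (by omega)
      have hble := lbN_le i.toNat (by omega)
      have h1 : 0 ≤ i - PySem.Int.band i (-i) := by rw [hb]; omega
      have h2 : (i - PySem.Int.band i (-i)).toNat ≤ n := by rw [hb]; omega
      rw [ih _ h2 h1 (by omega), hInv.2.2 i hi hm]
      rw [hb]
      rw [hb] at h1
      exact sum_Ioc_consec a _ _ _ (by omega) (by omega)
    · have : i = 0 := by omega
      subst this
      rw [fenQ, dif_neg (by omega)]
      simp

theorem fenQ_correct {a : Int → Int} {m : Int} {tr : List Int} (hInv : FInv a m tr)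
    (i : Int) (h0 : 0 ≤ i) (hm : i ≤ m) : fenQ tr i = ∑ r ∈ Finset.Ioc 0 i, a r :=
  fenQ_correct_aux hInv i.toNat i (le_refl _) h0 hm

theorem pyGetD_pySetD' (tr : List Int) (i j w : Int) (hi : 0 ≤ i) (hil : i.toNat < tr.length) (hj : 0 ≤ j) :
    PySem.List.pyGetD (PySem.List.pySetD tr i w) j 0 = if j = i then w else PySem.List.pyGetD tr j 0 := by
  rw [PySem.List.pySetD_of_nonneg _ _ hi,
      PySem.List.pyGetD_of_nonneg _ _ hj, PySem.List.pyGetD_of_nonneg _ _ hj]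
  by_cases h : j = i
  · subst h
    rw [if_pos rfl]
    rw [List.getD_eq_getElem?_getD, List.getElem?_set_self' ]
    simp [List.getElem?_eq_getElem hil]
  · rw [if_neg h]
    rw [List.getD_eq_getElem?_getD, List.getD_eq_getElem?_getD, List.getElem?_set_ne]
    omega

theorem fenU_pointwise_aux (m : Int) (hm : 0 ≤ m) (r v : Int) (hr : 0 < r) :
    ∀ (n : Nat) (i : Int) (tr : List Int), (m + 1 - i).toNat ≤ n → 0 < i →
    i - PySem.Int.band i (-i) < r → r ≤ i →
    tr.length = m.toNat + 1 →
    ∀ j : Int, 0 < j → j ≤ m →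
      PySem.List.pyGetD (fenU m tr i v) j 0 =
        PySem.List.pyGetD tr j 0 +
          (if i ≤ j ∧ j - PySem.Int.band j (-j) < r ∧ r ≤ j then v else 0) := by
  intro n
  induction n with
  | zero =>
    intro i tr hn h0 hlow hri hlen j hj1 hj2
    have him : ¬ (0 < i ∧ i ≤ m) := by omega
    rw [fenU, dif_neg him, if_neg (by omega)]
    ring
  | succ n ih =>
    intro i tr hn h0 hlow hri hlen j hj1 hj2
    by_cases him : i ≤ m
    · rw [fenU, dif_pos ⟨h0, him⟩]
      have hbp := pv_band_pos i h0
      have hgi : 0 < i + PySem.Int.band i (-i) := by omega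
      have hglow : (i + PySem.Int.band i (-i)) - PySem.Int.band (i + PySem.Int.band i (-i)) (-(i + PySem.Int.band i (-i))) < r :=
        lt_of_le_of_lt (band_nest i h0) hlow
      have hgr : r ≤ i + PySem.Int.band i (-i) := by omega
      rw [ih _ _ (by omega) hgi hglow hgr (by rw [PySem.List.length_pySetD]; exact hlen) j hj1 hj2]
      rw [pyGetD_pySetD' tr i j _ (by omega) (by omega) (by omega)]
      by_cases hji : j = i
      · subst hji
        rw [if_pos rfl, if_neg (by omega), if_pos ⟨le_refl _, hlow, hri⟩]
        ring
      · rw [if_neg hji]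
        by_cases hcond : j - PySem.Int.band j (-j) < r ∧ r ≤ j
        · by_cases hij : i ≤ j
          · have hilt : i < j := by omega
            have : i + PySem.Int.band i (-i) ≤ j := band_L2 i j h0 (by omega) hilt
            rw [if_pos ⟨this, hcond⟩, if_pos ⟨hij, hcond⟩]
          · rw [if_neg (by omega), if_neg (by tauto)]
        · rw [if_neg (by tauto), if_neg (by tauto)]
    · rw [fenU, dif_neg (by omega), if_neg (by omega)]
      ring

theorem fenU_correct {a : Int → Int} {m : Int} {tr : List Int} (hInv : FInv a m tr)
    (r v : Int) (hr : 0 < r) (hrm : r ≤ m) :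
    FInv (fun x => if x = r then a x + v else a x) m (fenU m tr r v) := by
  obtain ⟨hm, hlen, hval⟩ := hInv
  refine ⟨hm, by rw [length_fenU]; exact hlen, fun j hj1 hj2 => ?_⟩
  have hbp := pv_band_pos r hr
  rw [fenU_pointwise_aux m hm r v hr ((m + 1 - r).toNat) r tr (le_refl _) hr (by omega) (le_refl _) hlen j hj1 hj2]
  rw [hval j hj1 hj2]
  have hsplit : ∀ x : Int, (if x = r then a x + v else a x) = a x + (if x = r then v else 0) := by
    intro x; by_cases h : x = r <;> simp [h]
  rw [Finset.sum_congr rfl (fun x _ => hsplit x), Finset.sum_add_distrib, Finset.sum_ite_eq']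
  simp only [Finset.mem_Ioc]
  by_cases hc : j - PySem.Int.band j (-j) < r ∧ r ≤ j
  · rw [if_pos hc, if_pos ⟨hc.2, hc.1, hc.2⟩]
  · rw [if_neg hc, if_neg (by tauto)]

-- ---------- ranks ----------
def sSet (nums : List Int) : List Int := PySem.List.sorted (PySem.Set.ofList nums) (fun x => x) false
def rk (nums : List Int) (x : Int) : Int := ((sSet nums).idxOf x : Int) + 1
def dA (nums : List Int) : PySem.Dict Int Int :=
  (PySem.List.enumerate (sSet nums) 0).foldl (fun dd p => dd.insert p.2 (p.1 + 1)) PySem.Dict.empty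

theorem sSet_nodup (nums : List Int) : (sSet nums).Nodup :=
  ((PySem.List.sorted_perm (PySem.Set.ofList nums) (fun x => x) false).symm).nodup
    (PySem.Set.nodup_ofList nums)

theorem mem_sSet (nums : List Int) (x : Int) : x ∈ sSet nums ↔ x ∈ nums := by
  rw [sSet, PySem.List.mem_sorted, PySem.Set.mem_ofList]

theorem sSet_lt (nums : List Int) : (sSet nums).Pairwise (· < ·) :=
  PySem.List.sorted_ofList_pairwise_lt nums

theorem dA_items (nums : List Int) :
    (dA nums).items = (PySem.List.enumerate (sSet nums) 0).map (fun p => (p.2, p.1 + 1)) := by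
  rw [dA, PySem.Dict.items_foldl_insert_fresh _ _ _ _ (fun a _ => PySem.Dict.contains_empty a.2)]
  · rfl
  · rw [PySem.List.map_snd_enumerate]
    exact sSet_nodup nums

theorem dA_keys_nodup (nums : List Int) : (dA nums).keys.Nodup := by
  rw [dA]
  exact PySem.Dict.nodup_keys_foldl_insert_key _ _ _ _ (by simp [PySem.Dict.keys_empty])

theorem dA_getD (nums : List Int) (x : Int) (hx : x ∈ nums) :
    PySem.Dict.getD (dA nums) x 0 = rk nums x := by
  have hmem : x ∈ sSet nums := (mem_sSet nums x).mpr hx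
  have hlt : (sSet nums).idxOf x < (sSet nums).length := List.idxOf_lt_length_of_mem hmem
  have hpair : (x, ((sSet nums).idxOf x : Int) + 1) ∈ (dA nums).items := by
    rw [dA_items]
    refine List.mem_map.mpr ⟨((((sSet nums).idxOf x : Int)), x), ?_, by simp⟩
    rw [PySem.List.mem_enumerate_iff]
    exact ⟨(sSet nums).idxOf x, hlt, by simp [List.getElem_idxOf hlt]⟩
  exact PySem.Dict.getD_of_mem_items _ hpair (dA_keys_nodup nums) 0

theorem dA_size (nums : List Int) : ((dA nums).size : Int) = ((sSet nums).length : Int) := by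
  have : (dA nums).size = (dA nums).items.length := rfl
  rw [this, dA_items, List.length_map, PySem.List.length_enumerate]

theorem rk_pos (nums : List Int) (x : Int) : 1 ≤ rk nums x := by
  rw [rk]; omega

theorem rk_le (nums : List Int) (x : Int) (hx : x ∈ nums) : rk nums x ≤ ((sSet nums).length : Int) := by
  have hlt : (sSet nums).idxOf x < (sSet nums).length := List.idxOf_lt_length_of_mem ((mem_sSet nums x).mpr hx)
  rw [rk]; omega

theorem idx_lt_of_lt (nums : List Int) (x y : Int) (hx : x ∈ nums) (hy : y ∈ nums) (hxy : x < y) :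
    (sSet nums).idxOf x < (sSet nums).idxOf y := by
  have hmx : x ∈ sSet nums := (mem_sSet nums x).mpr hx
  have hmy : y ∈ sSet nums := (mem_sSet nums y).mpr hy
  have hlx : (sSet nums).idxOf x < (sSet nums).length := List.idxOf_lt_length_of_mem hmx
  have hly : (sSet nums).idxOf y < (sSet nums).length := List.idxOf_lt_length_of_mem hmy
  by_contra hge
  rcases Nat.lt_or_ge ((sSet nums).idxOf y) ((sSet nums).idxOf x) with hlt | hge2
  · have := (List.pairwise_iff_getElem.mp (sSet_lt nums)) _ _ hly hlx hlt
    rw [List.getElem_idxOf hly, List.getElem_idxOf hlx] at this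
    omega
  · have heq : (sSet nums).idxOf x = (sSet nums).idxOf y := by omega
    have : x = y := (List.idxOf_inj (l := sSet nums) hmx).mp heq
    omega

theorem rk_lt_iff (nums : List Int) (x y : Int) (hx : x ∈ nums) (hy : y ∈ nums) :
    (rk nums y < rk nums x ↔ y < x) := by
  constructor
  · intro h
    by_contra hge
    rcases lt_or_eq_of_le (by omega : x ≤ y) with hlt | heq
    · have := idx_lt_of_lt nums x y hx hy hlt
      rw [rk, rk] at h; omega
    · subst heq; rw [rk] at h; omega
  · intro h
    have := idx_lt_of_lt nums y x hy hx h
    rw [rk, rk]; omega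

theorem rk_le_iff (nums : List Int) (x y : Int) (hx : x ∈ nums) (hy : y ∈ nums) :
    (rk nums y ≤ rk nums x ↔ y ≤ x) := by
  have h1 := rk_lt_iff nums y x hy hx
  omega

-- ---------- inversion counting ----------
def cLT (w : List Int) (x : Int) : Int := (w.countP (fun y => decide (y < x)) : Int)
def cGT (w : List Int) (x : Int) : Int := (w.countP (fun y => decide (x < y)) : Int)
def NI : List Int → Int
  | [] => 0
  | x :: w => cLT w x + NI w
def aW (nums w : List Int) (r : Int) : Int := (w.countP (fun y => decide (rk nums y = r)) : Int)

theorem NI_snoc (w : List Int) (x : Int) : NI (w ++ [x]) = NI w + cGT w x := by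
  induction w with
  | nil => simp [NI, cLT, cGT]
  | cons y w ih =>
    show NI (y :: (w ++ [x])) = NI (y :: w) + cGT (y :: w) x
    rw [NI, NI, ih]
    have h1 : cLT (w ++ [x]) y = cLT w y + (if x < y then 1 else 0) := by
      rw [cLT, cLT, List.countP_append]
      simp only [List.countP_cons, List.countP_nil, decide_eq_true_eq]
      split_ifs <;> push_cast <;> ring
    have h2 : cGT (y :: w) x = cGT w x + (if x < y then 1 else 0) := by
      rw [cGT, cGT, List.countP_cons]
      simp only [decide_eq_true_eq]
      split_ifs <;> push_cast <;> ring
    rw [h1, h2]; ring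

theorem sum_aW (nums w : List Int) (h : ∀ y ∈ w, y ∈ nums) (i : Int) (hi : 0 ≤ i) :
    ∑ r ∈ Finset.Ioc 0 i, aW nums w r = (w.countP (fun y => decide (rk nums y ≤ i)) : Int) := by
  induction w with
  | nil => simp [aW]
  | cons y w ih =>
    have hmem : ∀ z ∈ w, z ∈ nums := fun z hz => h z (List.mem_cons_of_mem _ hz)
    have hstep : ∀ r : Int, aW nums (y :: w) r = aW nums w r + (if rk nums y = r then 1 else 0) := by
      intro r
      rw [aW, aW, List.countP_cons]
      simp only [decide_eq_true_eq]
      split_ifs <;> push_cast <;> ring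
    rw [Finset.sum_congr rfl (fun r _ => hstep r), Finset.sum_add_distrib, ih hmem]
    have : (∑ r ∈ Finset.Ioc 0 i, if rk nums y = r then (1:Int) else 0)
        = if rk nums y ∈ Finset.Ioc 0 i then 1 else 0 := by
      rw [← Finset.sum_ite_eq' (Finset.Ioc 0 i) (rk nums y) (fun _ => (1:Int))]
      exact Finset.sum_congr rfl (fun r _ => if_congr eq_comm rfl rfl)
    rw [this, List.countP_cons]
    have hpos := rk_pos nums y
    simp only [Finset.mem_Ioc]
    split_ifs with h1 h2 h2 <;> simp_all <;> omega

theorem cnt_rk_le (nums w : List Int) (x : Int) (h : ∀ y ∈ w, y ∈ nums) (hx : x ∈ nums) :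
    (w.countP (fun y => decide (rk nums y ≤ rk nums x)) : Int) = (w.countP (fun y => decide (y ≤ x)) : Int) := by
  congr 1
  apply List.countP_congr
  intro y hy
  simp only [decide_eq_true_eq]
  exact rk_le_iff nums x y hx (h y hy)

theorem cnt_rk_lt (nums w : List Int) (x : Int) (h : ∀ y ∈ w, y ∈ nums) (hx : x ∈ nums) :
    (w.countP (fun y => decide (rk nums y ≤ rk nums x - 1)) : Int) = cLT w x := by
  rw [cLT]
  congr 1
  apply List.countP_congr
  intro y hy
  simp only [decide_eq_true_eq]
  have := rk_lt_iff nums x y hx (h y hy)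
  omega

theorem cnt_split (w : List Int) (x : Int) :
    (w.countP (fun y => decide (y ≤ x)) : Int) + cGT w x = (w.length : Int) := by
  rw [cGT]
  have := List.length_eq_countP_add_countP (fun y : Int => decide (y ≤ x)) (l := w)
  have heq : w.countP (fun y => decide ¬(decide (y ≤ x)) = true) = w.countP (fun y => decide (x < y)) := by
    apply List.countP_congr
    intro y hy
    simp
  omega

theorem pyGetD_append_lt (w : List Int) (x : Int) (t : Int) (h0 : 0 ≤ t) (h1 : t < (w.length : Int)) :
    PySem.List.pyGetD (w ++ [x]) t 0 = PySem.List.pyGetD w t 0 := by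
  rw [PySem.List.pyGetD_of_nonneg _ _ h0, PySem.List.pyGetD_of_nonneg _ _ h0]
  rw [List.getD_append]
  omega

theorem pyGetD_append_self (w : List Int) (x : Int) :
    PySem.List.pyGetD (w ++ [x]) (w.length : Int) 0 = x := by
  rw [PySem.List.pyGetD_of_nonneg _ _ (by omega)]
  simp [List.getD_append_right]

theorem invB_snoc (w : List Int) (x : Int) : invB (w ++ [x]) = invB w + cGT w x := by
  rw [invB, invB]
  have hlen : ((w ++ [x]).length : Int) = (w.length : Int) + 1 := by simp
  rw [hlen, PySem.List.pyRange_one_succ_right (by omega : (0:Int) ≤ (w.length : Int)), List.foldl_append]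
  have hpre :
      (PySem.List.pyRange 0 (w.length : Int) 1).foldl
        (fun c j => (PySem.List.pyRange 0 j 1).foldl
          (fun c i => if PySem.List.pyGetD (w ++ [x]) i 0 > PySem.List.pyGetD (w ++ [x]) j 0 then c + 1 else c) c) (0 : Int)
      = (PySem.List.pyRange 0 (w.length : Int) 1).foldl
        (fun c j => (PySem.List.pyRange 0 j 1).foldl
          (fun c i => if PySem.List.pyGetD w i 0 > PySem.List.pyGetD w j 0 then c + 1 else c) c) (0 : Int) := by
    apply PySem.List.foldl_congr_mem
    intro acc j hj
    rw [PySem.List.mem_pyRange_one] at hj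
    apply PySem.List.foldl_congr_mem
    intro acc2 i hi
    rw [PySem.List.mem_pyRange_one] at hi
    rw [pyGetD_append_lt w x i hi.1 (by omega), pyGetD_append_lt w x j hj.1 hj.2]
  rw [List.foldl_cons, List.foldl_nil]
  rw [hpre]
  set c0 := (PySem.List.pyRange 0 (w.length : Int) 1).foldl
        (fun c j => (PySem.List.pyRange 0 j 1).foldl
          (fun c i => if PySem.List.pyGetD w i 0 > PySem.List.pyGetD w j 0 then c + 1 else c) c) (0 : Int) with hc0
  have hinner :
      (PySem.List.pyRange 0 (w.length : Int) 1).foldl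
        (fun c i => if PySem.List.pyGetD (w ++ [x]) i 0 > PySem.List.pyGetD (w ++ [x]) (w.length : Int) 0 then c + 1 else c) c0
      = (PySem.List.pyRange 0 (w.length : Int) 1).foldl
        (fun c i => if PySem.List.pyGetD w i 0 > x then c + 1 else c) c0 := by
    apply PySem.List.foldl_congr_mem
    intro acc i hi
    rw [PySem.List.mem_pyRange_one] at hi
    rw [pyGetD_append_lt w x i hi.1 hi.2, pyGetD_append_self]
  rw [hinner]
  have := PySem.List.foldl_pyRange_zero_pyGetD' (xs := w) (d := 0)
      (f := fun c y => if y > x then c + 1 else c) (init := c0)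
  rw [this]
  rw [PySem.List.foldl_ite_add_one (p := fun y : Int => x < y)]
  rw [cGT]

theorem invB_eq_NI (w : List Int) : invB w = NI w := by
  induction w using List.reverseRecOn with
  | nil => rfl
  | append_singleton w x ih => rw [invB_snoc, NI_snoc, ih]

-- ---------- windows ----------
def wnd (nums : List Int) (k s : Int) : List Int := PySem.List.slice nums (some s) (some (s + k))

theorem wnd_zero (nums : List Int) (k : Int) :
    wnd nums k 0 = PySem.List.slice nums none (some k) := by
  rw [wnd, zero_add, PySem.List.slice_zero_start]

theorem wnd_mem (nums : List Int) (k s : Int) (y : Int) (hy : y ∈ wnd nums k s) : y ∈ nums :=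
  PySem.List.mem_of_mem_slice _ _ _ hy

theorem slice_mem (nums : List Int) (k : Int) (y : Int) (hy : y ∈ PySem.List.slice nums none (some k)) : y ∈ nums :=
  PySem.List.mem_of_mem_slice _ _ _ hy

theorem wnd_decomp (nums : List Int) (k i : Int) (hk : 1 ≤ k) (hki : k ≤ i) (hin : i < (nums.length : Int)) :
    wnd nums k (i - k) = PySem.List.pyGetD nums (i - k) 0 ::
        ((nums.drop ((i - k).toNat + 1)).take (k.toNat - 1))
    ∧ wnd nums k (i - k + 1) =
        ((nums.drop ((i - k).toNat + 1)).take (k.toNat - 1)) ++ [PySem.List.pyGetD nums i 0]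
    ∧ ((nums.drop ((i - k).toNat + 1)).take (k.toNat - 1)).length = k.toNat - 1 := by
  have hs0 : 0 ≤ i - k := by omega
  have hsn : (i - k).toNat + k.toNat ≤ nums.length := by omega
  have hlt : (i - k).toNat < nums.length := by omega
  have hilt : i.toNat < nums.length := by omega
  refine ⟨?_, ?_, ?_⟩
  · rw [wnd, PySem.List.slice_toNat _ hs0 (by omega)]
    have h1 : (i - k + k).toNat - (i - k).toNat = k.toNat := by omega
    rw [h1, List.drop_eq_getElem_cons hlt]
    have h2 : k.toNat = (k.toNat - 1) + 1 := by omega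
    rw [h2, List.take_succ_cons]
    congr 1
    rw [PySem.List.pyGetD_of_nonneg _ _ hs0, List.getD_eq_getElem?_getD, List.getElem?_eq_getElem hlt]
    rfl
  · rw [wnd, PySem.List.slice_toNat _ (by omega) (by omega)]
    have h1 : (i - k + 1 + k).toNat - (i - k + 1).toNat = k.toNat := by omega
    have h2 : (i - k + 1).toNat = (i - k).toNat + 1 := by omega
    rw [h1, h2]
    have h3 : k.toNat = (k.toNat - 1) + 1 := by omega
    rw [h3, List.take_succ]
    congr 1
    rw [List.getElem?_drop]
    have h4 : (i - k).toNat + 1 + (k.toNat - 1) = i.toNat := by omega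
    rw [h4, List.getElem?_eq_getElem hilt]
    rw [PySem.List.pyGetD_of_nonneg _ _ (by omega)]
    rw [List.getD_eq_getElem?_getD, List.getElem?_eq_getElem hilt]
    rfl
  · rw [List.length_take, List.length_drop]
    omega

-- aW cons/append
theorem aW_cons (nums : List Int) (x : Int) (w : List Int) (r : Int) :
    aW nums (x :: w) r = aW nums w r + (if r = rk nums x then 1 else 0) := by
  rw [aW, aW, List.countP_cons]
  simp only [decide_eq_true_eq]
  by_cases h : rk nums x = r
  · rw [if_pos h, if_pos h.symm]; push_cast; ring
  · rw [if_neg h, if_neg (fun hh => h hh.symm)]; push_cast; ring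

theorem aW_snoc (nums : List Int) (x : Int) (w : List Int) (r : Int) :
    aW nums (w ++ [x]) r = aW nums w r + (if r = rk nums x then 1 else 0) := by
  rw [aW, aW, List.countP_append, List.countP_cons, List.countP_nil]
  simp only [decide_eq_true_eq]
  by_cases h : rk nums x = r
  · rw [if_pos h, if_pos h.symm]; push_cast; ring
  · rw [if_neg h, if_neg (fun hh => h hh.symm)]; push_cast; ring

-- ---------- loop 1: building the first window ----------
def step1 (d : PySem.Dict Int Int) (m : Int) (st : Int × List Int) (p : Int × Int) : Int × List Int :=
  (st.1 + p.1 - fenQ st.2 (PySem.Dict.getD d p.2 0), fenU m st.2 (PySem.Dict.getD d p.2 0) 1)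

theorem loop1 (nums : List Int) :
    ∀ (l pre : List Int) (tr : List Int), (∀ y ∈ l, y ∈ nums) → (∀ y ∈ pre, y ∈ nums) →
    FInv (aW nums pre) ((sSet nums).length : Int) tr →
    ((PySem.List.enumerate l (pre.length : Int)).foldl
        (step1 (dA nums) ((sSet nums).length : Int)) (NI pre, tr)).1 = NI (pre ++ l)
    ∧ FInv (aW nums (pre ++ l)) ((sSet nums).length : Int)
        ((PySem.List.enumerate l (pre.length : Int)).foldl
          (step1 (dA nums) ((sSet nums).length : Int)) (NI pre, tr)).2 := by
  intro l
  induction l with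
  | nil =>
    intro pre tr _ hpre hinv
    constructor
    · simp [PySem.List.enumerate_nil]
    · simpa [PySem.List.enumerate_nil] using hinv
  | cons x l ih =>
    intro pre tr hl hpre hinv
    have hx : x ∈ nums := hl x (List.mem_cons_self)
    have hrk1 : 1 ≤ rk nums x := rk_pos nums x
    have hrkm : rk nums x ≤ ((sSet nums).length : Int) := rk_le nums x hx
    rw [PySem.List.enumerate_cons, List.foldl_cons]
    simp only [step1]
    have hd : PySem.Dict.getD (dA nums) x 0 = rk nums x := dA_getD nums x hx
    have hq : fenQ tr (rk nums x) = ∑ r ∈ Finset.Ioc 0 (rk nums x), aW nums pre r :=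
      fenQ_correct hinv _ (by omega) hrkm
    have hcur : NI pre + (pre.length : Int) - fenQ tr (rk nums x) = NI (pre ++ [x]) := by
      rw [hq, sum_aW nums pre hpre _ (by omega),
          cnt_rk_le nums pre x hpre hx, NI_snoc]
      have := cnt_split pre x
      omega
    have hinv' : FInv (aW nums (pre ++ [x])) ((sSet nums).length : Int)
        (fenU ((sSet nums).length : Int) tr (rk nums x) 1) := by
      refine FInv_congr (fun r => ?_) (fenU_correct hinv (rk nums x) 1 (by omega) hrkm)
      rw [aW_snoc]
      split_ifs <;> ring
    have hstep := ih (pre ++ [x]) (fenU ((sSet nums).length : Int) tr (rk nums x) 1)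
      (fun y hy => hl y (List.mem_cons_of_mem _ hy))
      (fun y hy => by
        rcases List.mem_append.mp hy with h | h
        · exact hpre y h
        · rw [List.mem_singleton] at h; subst h; exact hx)
      hinv'
    have hlen : ((pre ++ [x]).length : Int) = (pre.length : Int) + 1 := by simp
    rw [hlen] at hstep
    simp only [hd, hcur]
    rw [show pre ++ x :: l = (pre ++ [x]) ++ l by simp]
    exact hstep

def stepA (d : PySem.Dict Int Int) (m : Int) (nums : List Int) (k : Int)
    (st : Int × Int × List Int) (i : Int) : Int × Int × List Int :=
  let rOut := PySem.Dict.getD d (PySem.List.pyGetD nums (i - k) 0) 0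
  let tr1 := fenU m st.2.2 rOut (-1)
  let cur1 := st.1 - fenQ tr1 (rOut - 1)
  let rIn := PySem.Dict.getD d (PySem.List.pyGetD nums i 0) 0
  let cur2 := cur1 + k - 1 - fenQ tr1 rIn
  let tr2 := fenU m tr1 rIn 1
  (cur2, (if cur2 < st.2.1 then cur2 else st.2.1), tr2)

theorem loop2 (nums : List Int) (k : Int) (hk : 1 ≤ k) :
    ∀ (c : Nat) (i : Int), ((nums.length : Int) - i).toNat ≤ c → k ≤ i → i ≤ (nums.length : Int) →
    ∀ (tr : List Int) (ans : Int),
    FInv (aW nums (wnd nums k (i - k))) ((sSet nums).length : Int) tr →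
    ((PySem.List.pyRange i (nums.length : Int) 1).foldl
        (stepA (dA nums) ((sSet nums).length : Int) nums k)
        (NI (wnd nums k (i - k)), ans, tr)).2.1
      = (PySem.List.pyRange (i - k + 1) ((nums.length : Int) - k + 1) 1).foldl
          (fun best s => min best (NI (wnd nums k s))) ans := by
  intro c
  induction c with
  | zero =>
    intro i hc hki hin tr ans _
    have hieq : i = (nums.length : Int) := by omega
    subst hieq
    rw [PySem.List.pyRange_one_eq_nil (by omega), PySem.List.pyRange_one_eq_nil (by omega),
        List.foldl_nil, List.foldl_nil]
  | succ c ih =>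
    intro i hc hki hin tr ans hinv
    by_cases hieq : i = (nums.length : Int)
    · subst hieq
      rw [PySem.List.pyRange_one_eq_nil (by omega), PySem.List.pyRange_one_eq_nil (by omega),
          List.foldl_nil, List.foldl_nil]
    · have hilt : i < (nums.length : Int) := by omega
      obtain ⟨hw1, hw2, hw3⟩ := wnd_decomp nums k i hk hki hilt
      set x0 := PySem.List.pyGetD nums (i - k) 0 with hx0def
      set xin := PySem.List.pyGetD nums i 0 with hxindef
      set rest := (nums.drop ((i - k).toNat + 1)).take (k.toNat - 1) with hrestdef
      have hx0mem : x0 ∈ nums := wnd_mem nums k (i - k) x0 (by rw [hw1]; exact List.mem_cons_self)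
      have hxinmem : xin ∈ nums := wnd_mem nums k (i - k + 1) xin
        (by rw [hw2]; exact List.mem_append.mpr (Or.inr (List.mem_singleton.mpr rfl)))
      have hrestmem : ∀ y ∈ rest, y ∈ nums := fun y hy =>
        wnd_mem nums k (i - k) y (by rw [hw1]; exact List.mem_cons_of_mem _ hy)
      have hr1 := rk_pos nums x0
      have hr1m := rk_le nums x0 hx0mem
      have hr2 := rk_pos nums xin
      have hr2m := rk_le nums xin hxinmem
      rw [PySem.List.pyRange_one_cons hilt, List.foldl_cons]
      have htr1 : FInv (aW nums rest) ((sSet nums).length : Int)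
          (fenU ((sSet nums).length : Int) tr (rk nums x0) (-1)) := by
        refine FInv_congr (fun t => ?_) (fenU_correct hinv (rk nums x0) (-1) (by omega) hr1m)
        rw [hw1, aW_cons]
        split_ifs <;> ring
      have hq1 : fenQ (fenU ((sSet nums).length : Int) tr (rk nums x0) (-1)) (rk nums x0 - 1)
          = cLT rest x0 := by
        rw [fenQ_correct htr1 _ (by omega) (by omega),
            sum_aW nums rest hrestmem _ (by omega), cnt_rk_lt nums rest x0 hrestmem hx0mem]
      have hq2 : fenQ (fenU ((sSet nums).length : Int) tr (rk nums x0) (-1)) (rk nums xin)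
          = (rest.countP (fun y => decide (y ≤ xin)) : Int) := by
        rw [fenQ_correct htr1 _ (by omega) (by omega),
            sum_aW nums rest hrestmem _ (by omega), cnt_rk_le nums rest xin hrestmem hxinmem]
      have hNIw : NI (wnd nums k (i - k)) = cLT rest x0 + NI rest := by
        rw [hw1, NI]
      have hcur2 : NI (wnd nums k (i - k)) - cLT rest x0 + k - 1
            - (rest.countP (fun y => decide (y ≤ xin)) : Int)
          = NI (wnd nums k (i - k + 1)) := by
        rw [hNIw, hw2, NI_snoc]
        have hsplit := cnt_split rest xin
        have hlen : (rest.length : Int) = k - 1 := by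
          rw [hw3]; omega
        omega
      have htr2 : FInv (aW nums (wnd nums k (i - k + 1))) ((sSet nums).length : Int)
          (fenU ((sSet nums).length : Int)
            (fenU ((sSet nums).length : Int) tr (rk nums x0) (-1)) (rk nums xin) 1) := by
        refine FInv_congr (fun t => ?_) (fenU_correct htr1 (rk nums xin) 1 (by omega) hr2m)
        rw [hw2, aW_snoc]
        split_ifs <;> ring
      have hstep : stepA (dA nums) ((sSet nums).length : Int) nums k
            (NI (wnd nums k (i - k)), ans, tr) i
          = (NI (wnd nums k (i - k + 1)),
              min ans (NI (wnd nums k (i - k + 1))),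
              fenU ((sSet nums).length : Int)
                (fenU ((sSet nums).length : Int) tr (rk nums x0) (-1)) (rk nums xin) 1) := by
        rw [stepA]
        dsimp only
        rw [← hx0def, ← hxindef, dA_getD nums x0 hx0mem, dA_getD nums xin hxinmem,
            hq1, hq2, hcur2]
        have : (if NI (wnd nums k (i - k + 1)) < ans then NI (wnd nums k (i - k + 1)) else ans)
            = min ans (NI (wnd nums k (i - k + 1))) := by
          split_ifs <;> omega
        rw [this]
      rw [hstep]
      have hrec := ih (i + 1) (by omega) (by omega) (by omega)
        (fenU ((sSet nums).length : Int)
          (fenU ((sSet nums).length : Int) tr (rk nums x0) (-1)) (rk nums xin) 1)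
        (min ans (NI (wnd nums k (i - k + 1))))
        (by rw [show i + 1 - k = i - k + 1 by ring]; exact htr2)
      rw [show i + 1 - k = i - k + 1 by ring] at hrec
      rw [hrec, show i - k + 1 + 1 = i + 1 - k + 1 by ring]
      rw [PySem.List.pyRange_one_cons (show i - k + 1 < (nums.length : Int) - k + 1 by omega),
          List.foldl_cons]
      rw [show i + 1 - k + 1 = i - k + 1 + 1 by ring]

theorem sum_delta (S : Finset Int) (r v : Int) :
    ∑ t ∈ S, (if t = r then v else 0) = if r ∈ S then v else 0 :=
  Finset.sum_ite_eq' S r (fun _ => v)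

theorem pyGetD_mem' (nums : List Int) (i : Int) (h0 : 0 ≤ i) (h1 : i < (nums.length : Int)) :
    PySem.List.pyGetD nums i 0 ∈ nums := by
  rw [PySem.List.pyGetD_of_nonneg _ _ h0, List.getD_eq_getElem?_getD,
      List.getElem?_eq_getElem (by omega : i.toNat < nums.length)]
  exact List.getElem_mem _

theorem loop0 (nums : List Int) :
    ∀ (c : Nat) (i : Int), ((nums.length : Int) - i).toNat ≤ c → 0 ≤ i → i ≤ (nums.length : Int) →
    ∀ (tr : List Int), FInv (fun _ => 0) ((sSet nums).length : Int) tr →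
    ((PySem.List.pyRange i (nums.length : Int) 1).foldl
        (stepA (dA nums) ((sSet nums).length : Int) nums 0) (0, 0, tr)).2.1 = 0 := by
  intro c
  induction c with
  | zero =>
    intro i hc h0 hin tr _
    have : i = (nums.length : Int) := by omega
    subst this
    rw [PySem.List.pyRange_one_eq_nil (by omega), List.foldl_nil]
  | succ c ih =>
    intro i hc h0 hin tr hinv
    by_cases hieq : i = (nums.length : Int)
    · subst hieq
      rw [PySem.List.pyRange_one_eq_nil (by omega), List.foldl_nil]
    · have hilt : i < (nums.length : Int) := by omega
      set x := PySem.List.pyGetD nums i 0 with hxdef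
      have hxmem : x ∈ nums := pyGetD_mem' nums i h0 hilt
      have hr1 := rk_pos nums x
      have hr1m := rk_le nums x hxmem
      rw [PySem.List.pyRange_one_cons hilt, List.foldl_cons]
      have htr1 : FInv (fun t => if t = rk nums x then (-1 : Int) else 0) ((sSet nums).length : Int)
          (fenU ((sSet nums).length : Int) tr (rk nums x) (-1)) := by
        refine FInv_congr (fun t => ?_) (fenU_correct hinv (rk nums x) (-1) (by omega) hr1m)
        split_ifs <;> ring
      have hq1 : fenQ (fenU ((sSet nums).length : Int) tr (rk nums x) (-1)) (rk nums x - 1) = 0 := by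
        rw [fenQ_correct htr1 _ (by omega) (by omega), sum_delta,
            if_neg (by rw [Finset.mem_Ioc]; omega)]
      have hq2 : fenQ (fenU ((sSet nums).length : Int) tr (rk nums x) (-1)) (rk nums x) = -1 := by
        rw [fenQ_correct htr1 _ (by omega) (by omega), sum_delta,
            if_pos (by rw [Finset.mem_Ioc]; omega)]
      have htr2 : FInv (fun _ => (0 : Int)) ((sSet nums).length : Int)
          (fenU ((sSet nums).length : Int)
            (fenU ((sSet nums).length : Int) tr (rk nums x) (-1)) (rk nums x) 1) := by
        refine FInv_congr (fun t => ?_) (fenU_correct htr1 (rk nums x) 1 (by omega) hr1m)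
        split_ifs <;> ring
      have hstep : stepA (dA nums) ((sSet nums).length : Int) nums 0 (0, 0, tr) i
          = (0, 0, fenU ((sSet nums).length : Int)
              (fenU ((sSet nums).length : Int) tr (rk nums x) (-1)) (rk nums x) 1) := by
        rw [stepA]
        dsimp only
        rw [sub_zero, ← hxdef, dA_getD nums x hxmem, hq1, hq2]
        norm_num
      rw [hstep]
      exact ih (i + 1) (by omega) (by omega) (by omega) _ htr2

theorem foldl_min_zero (l : List Int) (f : Int → Int) (h : ∀ s ∈ l, f s = 0) :
    l.foldl (fun b s => min b (f s)) 0 = 0 := by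
  induction l with
  | nil => rfl
  | cons s l ih =>
    rw [List.foldl_cons, h s List.mem_cons_self]
    simpa using ih (fun t ht => h t (List.mem_cons_of_mem _ ht))

theorem minInversionCount_eq_alt (nums : List Int) (k : Int) (hk : 0 ≤ k) :
    minInversionCount nums k = minInversionCount_alt nums k := by
  have hM0 : (0 : Int) ≤ ((sSet nums).length : Int) := by positivity
  have hA : minInversionCount nums k =
      ((PySem.List.pyRange k (nums.length : Int) 1).foldl
        (stepA (dA nums) (((dA nums).size : Nat) : Int) nums k)
        (((PySem.List.enumerate (PySem.List.slice nums none (some k)) 0).foldl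
            (step1 (dA nums) (((dA nums).size : Nat) : Int))
            ((0 : Int), List.replicate ((((dA nums).size : Nat) : Int).toNat + 1) 0)).1,
          ((PySem.List.enumerate (PySem.List.slice nums none (some k)) 0).foldl
            (step1 (dA nums) (((dA nums).size : Nat) : Int))
            ((0 : Int), List.replicate ((((dA nums).size : Nat) : Int).toNat + 1) 0)).1,
          ((PySem.List.enumerate (PySem.List.slice nums none (some k)) 0).foldl
            (step1 (dA nums) (((dA nums).size : Nat) : Int))
            ((0 : Int), List.replicate ((((dA nums).size : Nat) : Int).toNat + 1) 0)).2)).2.1 := rfl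
  rw [dA_size] at hA
  by_cases hk0 : k = 0
  · subst hk0
    have hsl : PySem.List.slice nums none (some (0 : Int)) = [] := by
      rw [PySem.List.slice_to _ (by omega)]
      rfl
    rw [hsl] at hA
    simp only [PySem.List.enumerate_nil, List.foldl_nil] at hA
    have hAz := loop0 nums ((nums.length : Int) - 0).toNat 0 (le_refl _) (by omega) (by omega)
      (List.replicate ((((sSet nums).length : Int)).toNat + 1) 0)
      (FInv_init _ hM0)
    rw [hA, hAz]
    rw [minInversionCount_alt, hsl]
    have hinvnil : invB ([] : List Int) = 0 := rfl
    rw [hinvnil]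
    symm
    apply foldl_min_zero
    intro s hs
    rw [PySem.List.mem_pyRange_one] at hs
    have h1 : s + (0 : Int) = s := by ring
    rw [h1, PySem.List.slice_toNat _ (by omega) (by omega)]
    simp [invB]
  · have hk1 : 1 ≤ k := by omega
    have h1 := loop1 nums (PySem.List.slice nums none (some k)) [] _
      (slice_mem nums k) (by simp)
      (FInv_congr (fun r => by simp [aW]) (FInv_init _ hM0))
    simp only [List.length_nil, Nat.cast_zero, List.nil_append,
      show NI ([] : List Int) = (0 : Int) from rfl] at h1
    rw [h1.1] at hA
    have hBeq : minInversionCount_alt nums k =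
        (PySem.List.pyRange 1 ((nums.length : Int) - k + 1) 1).foldl
          (fun best s => min best (NI (wnd nums k s)))
          (NI (PySem.List.slice nums none (some k))) := by
      rw [minInversionCount_alt]
      simp only [invB_eq_NI, wnd]
    by_cases hkn : k ≤ (nums.length : Int)
    · have h2 := loop2 nums k hk1 ((nums.length : Int) - k).toNat k (le_refl _) (le_refl _) hkn
        ((PySem.List.enumerate (PySem.List.slice nums none (some k)) 0).foldl
          (step1 (dA nums) (((sSet nums).length : Int)))
          ((0 : Int), List.replicate ((((sSet nums).length : Int)).toNat + 1) 0)).2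
        (NI (PySem.List.slice nums none (some k)))
        (by rw [show k - k = (0:Int) by ring, wnd_zero]; exact h1.2)
      rw [show k - k = (0:Int) by ring, wnd_zero, zero_add] at h2
      rw [hA, h2, hBeq]
    · rw [PySem.List.pyRange_one_eq_nil (by omega), List.foldl_nil] at hA
      rw [hA, hBeq, PySem.List.pyRange_one_eq_nil (by omega), List.foldl_nil]

-- ===== VERDICT (by name: the statement is the Claim_ definition above) =====
theorem minInversionCount_spec : Claim_equal_minInversionCount := by
  intro nums k _ hk
  exact minInversionCount_eq_alt nums k hk
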